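-- pv_equiv track=rewrite | github.com/Machione/advent-of-code-2025 | day4/puzzle1.py | count_free_rolls
-- ===== SOURCE A (Python) =====
-- def get_neighbours(
--     array: tuple[tuple[int, ...], ...], x_y_index: tuple[int, int]
-- ) -> list[int]:
--     x_selected, y_selected = x_y_index
--     max_x_exclusive = len(array[0])
--     max_y_exclusive = len(array)
--
--     neighbours = []
--     for x in range(max(0, x_selected - 1), min(max_x_exclusive, x_selected + 2)):
--         for y in range(max(0, y_selected - 1), min(max_y_exclusive, y_selected + 2)):
--             if x != x_selected or y != y_selected:
--                 neighbours.append(array[y][x])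
--
--     return neighbours
--
-- def count_free_rolls(array: tuple[tuple[int, ...], ...]) -> int:
--     count = 0
--     for x in range(len(array[0])):
--         for y in range(len(array)):
--             if array[y][x] == 1:
--                 neighbours = get_neighbours(array, (x, y))
--                 num_neighbouring_rolls = sum(neighbours)
--                 if num_neighbouring_rolls < 4:
--                     count += 1
--
--     return count
-- ===== SOURCE B (Python) =====
-- def count_free_rolls(array):
--     h = len(array)
--     w = len(array[0])
--     # prefix[y][x] = sum of array[i][j] for i < y, j < x  (only the first w columns count)
--     prefix = [[0] * (w + 1)]
--     for row in array:
--         prev = prefix[-1]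
--         new = [0]
--         running = 0
--         for x in range(w):
--             running += row[x]
--             new.append(running + prev[x + 1])
--         prefix.append(new)
--     count = 0
--     for y in range(h):
--         row = array[y]
--         for x in range(w):
--             if row[x] == 1:
--                 y0, y1 = max(0, y - 1), min(h, y + 2)
--                 x0, x1 = max(0, x - 1), min(w, x + 2)
--                 block = prefix[y1][x1] - prefix[y0][x1] - prefix[y1][x0] + prefix[y0][x0]
--                 if block - 1 < 4:
--                     count += 1
--     return count
-- ===== Notes on version B (the rewrite author's own statement) =====
-- stated objective: alternative
-- what changed: B builds a 2D prefix-sum (summed-area) table of the grid in one initial pass and evaluates each cell's clipped 3x3 block sum in O(1) by inclusion-exclusion, instead of A's per-cell nested-range neighbour collection; B also iterates rows-outer rather than A's columns-outer.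
import Mathlib
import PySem

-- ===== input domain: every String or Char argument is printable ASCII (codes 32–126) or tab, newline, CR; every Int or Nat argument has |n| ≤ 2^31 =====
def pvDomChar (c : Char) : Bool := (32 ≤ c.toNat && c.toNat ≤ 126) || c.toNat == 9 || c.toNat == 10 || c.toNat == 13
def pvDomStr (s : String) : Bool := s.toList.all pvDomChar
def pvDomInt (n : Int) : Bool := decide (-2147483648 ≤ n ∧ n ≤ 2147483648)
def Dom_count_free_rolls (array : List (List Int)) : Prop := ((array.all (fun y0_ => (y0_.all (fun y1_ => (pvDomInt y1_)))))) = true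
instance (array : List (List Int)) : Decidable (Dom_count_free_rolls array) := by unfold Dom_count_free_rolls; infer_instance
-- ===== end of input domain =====

-- B replaces A's per-cell neighbour-collecting scan by a 2D prefix-sum (summed-area) table
-- built in one pass, reading each clipped 3x3 block sum in O(1); return values are proved equal.

-- ===== PORT A =====

-- array[y][x] (both indices nonnegative and in range on every use inside Pre_)
def pvGet (array : List (List Int)) (y x : Int) : Int :=
  PySem.List.pyGetD (PySem.List.pyGetD array y []) x 0

def get_neighbours (array : List (List Int)) (x_selected y_selected : Int) : List Int :=
  let max_x_exclusive : Int := (PySem.List.pyGetD array 0 []).length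
  let max_y_exclusive : Int := array.length
  (PySem.List.pyRange (max 0 (x_selected - 1)) (min max_x_exclusive (x_selected + 2)) 1).foldl
    (fun acc x =>
      (PySem.List.pyRange (max 0 (y_selected - 1)) (min max_y_exclusive (y_selected + 2)) 1).foldl
        (fun acc2 y =>
          if x ≠ x_selected ∨ y ≠ y_selected then acc2 ++ [pvGet array y x] else acc2)
        acc)
    []

def count_free_rolls (array : List (List Int)) : Int :=
  (PySem.List.pyRange 0 ((PySem.List.pyGetD array 0 []).length : Int) 1).foldl
    (fun count x =>
      (PySem.List.pyRange 0 (array.length : Int) 1).foldl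
        (fun c y =>
          if pvGet array y x = 1 then
            (if (get_neighbours array x y).sum < 4 then c + 1 else c)
          else c)
        count)
    0

-- ===== PORT B =====

-- inner loop of the table builder: new = [0]; running = 0; for x in range(w): ...
def pvPrefixRow (prev row : List Int) (w : Nat) : List Int :=
  ((PySem.List.pyRange 0 (w : Int) 1).foldl
    (fun (st : List Int × Int) x =>
      let running := st.2 + PySem.List.pyGetD row x 0
      (st.1 ++ [running + PySem.List.pyGetD prev (x + 1) 0], running))
    ([0], 0)).1

def count_free_rolls_alt (array : List (List Int)) : Int :=
  let h : Int := array.length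
  let w : Int := (PySem.List.pyGetD array 0 []).length
  let prefixT : List (List Int) :=
    array.foldl
      (fun P row => P ++ [pvPrefixRow (PySem.List.pyGetD P (-1) []) row w.toNat])
      [List.replicate (w.toNat + 1) 0]
  (PySem.List.pyRange 0 h 1).foldl
    (fun count y =>
      let row := PySem.List.pyGetD array y []
      (PySem.List.pyRange 0 w 1).foldl
        (fun c x =>
          if PySem.List.pyGetD row x 0 = 1 then
            (if (PySem.List.pyGetD (PySem.List.pyGetD prefixT (min h (y + 2)) []) (min w (x + 2)) 0
                  - PySem.List.pyGetD (PySem.List.pyGetD prefixT (max 0 (y - 1)) []) (min w (x + 2)) 0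
                  - PySem.List.pyGetD (PySem.List.pyGetD prefixT (min h (y + 2)) []) (max 0 (x - 1)) 0
                  + PySem.List.pyGetD (PySem.List.pyGetD prefixT (max 0 (y - 1)) []) (max 0 (x - 1)) 0)
                  - 1 < 4 then c + 1 else c)
          else c)
        count)
    0

-- ===== PRECONDITION & SPEC =====
-- Pre_ excludes exactly the inputs on which Python A raises IndexError: the empty grid
-- (len(array[0])) and grids with some row shorter than row 0 (array[y][x]).
def Pre_count_free_rolls (array : List (List Int)) : Prop :=
  array ≠ [] ∧ ∀ r ∈ array, (array.headD []).length ≤ r.length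
instance (array : List (List Int)) : Decidable (Pre_count_free_rolls array) := by
  unfold Pre_count_free_rolls; infer_instance

def pvWitness_count_free_rolls : List (List Int) := [[1, 0], [0, 1]]

def Spec_count_free_rolls (array : List (List Int)) (out : Int) : Prop := out = count_free_rolls_alt array
instance (array : List (List Int)) (out : Int) : Decidable (Spec_count_free_rolls array out) := by unfold Spec_count_free_rolls; infer_instance

-- ===== CLAIM (what is proved, stated in full; the proofs are below) =====
def Claim_equal_count_free_rolls : Prop := ∀ (array : List (List Int)), Dom_count_free_rolls array → Pre_count_free_rolls array → Spec_count_free_rolls array (count_free_rolls array)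

-- ===== LEMMAS AND PROOFS =====

-- a[i][j] with Nat indices, 0 outside
def pvCell (a : List (List Int)) (i j : Nat) : Int := (a.getD i []).getD j 0

-- number of columns A and B work with
def pvW (a : List (List Int)) : Nat := (a.getD 0 []).length

-- sum of f over 0..n-1
def pvRsum (f : Nat → Int) (n : Nat) : Int := ((List.range n).map f).sum

-- prefix sum S y x = Σ_{i<y} Σ_{j<x} a[i][j]
def pvS (a : List (List Int)) (y x : Nat) : Int := pvRsum (fun i => pvRsum (fun j => pvCell a i j) x) y

-- block sum over rows [y0,y1) and columns [x0,x1)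
def pvBlk (a : List (List Int)) (y0 y1 x0 x1 : Nat) : Int :=
  pvRsum (fun i => pvRsum (fun j => pvCell a (y0 + i) (x0 + j)) (x1 - x0)) (y1 - y0)

-- 0/1 indicator of a counted cell
def pvInd (a : List (List Int)) (y x : Nat) : Int :=
  if pvCell a y x = 1 ∧
      pvBlk a (y - 1) (min a.length (y + 2)) (x - 1) (min (pvW a) (x + 2)) - 1 < 4
  then 1 else 0

theorem pvGet_natCast (a : List (List Int)) (y x : Nat) : pvGet a ↑y ↑x = pvCell a y x := by
  simp [pvGet, pvCell, PySem.List.pyGetD_natCast]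

theorem pvRsum_succ (f : Nat → Int) (n : Nat) : pvRsum f (n + 1) = pvRsum f n + f n := by
  simp [pvRsum, List.range_succ]

theorem pvRsum_congr {f g : Nat → Int} (n : Nat) (h : ∀ k < n, f k = g k) :
    pvRsum f n = pvRsum g n := by
  unfold pvRsum
  congr 1
  exact List.map_congr_left (fun k hk => h k (List.mem_range.mp hk))

theorem pvRsum_const_zero (n : Nat) : pvRsum (fun _ => (0 : Int)) n = 0 := by
  simp [pvRsum]

theorem pvRsum_add (f g : Nat → Int) (n : Nat) :
    pvRsum (fun k => f k + g k) n = pvRsum f n + pvRsum g n := by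
  induction n with
  | zero => rfl
  | succ n ih => simp only [pvRsum_succ, ih]; ring

theorem pvRsum_sub (f g : Nat → Int) (n : Nat) :
    pvRsum (fun k => f k - g k) n = pvRsum f n - pvRsum g n := by
  induction n with
  | zero => rfl
  | succ n ih => simp only [pvRsum_succ, ih]; ring

theorem pvRsum_swap (f : Nat → Nat → Int) (m n : Nat) :
    pvRsum (fun i => pvRsum (fun j => f i j) n) m
      = pvRsum (fun j => pvRsum (fun i => f i j) m) n := by
  induction m with
  | zero => simp [pvRsum]
  | succ m ih =>
      rw [pvRsum_succ, ih, ← pvRsum_add]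
      exact pvRsum_congr n (fun k _ => (pvRsum_succ (fun i => f i k) m).symm)

theorem pvRsum_range_add (f : Nat → Int) (a b : Nat) :
    pvRsum f (a + b) = pvRsum f a + pvRsum (fun k => f (a + k)) b := by
  induction b with
  | zero => simp [pvRsum]
  | succ b ih => rw [← Nat.add_assoc, pvRsum_succ, ih, pvRsum_succ]; ring

theorem pvS_diff_y (a : List (List Int)) (x : Nat) {y0 y1 : Nat} (h : y0 ≤ y1) :
    pvS a y1 x - pvS a y0 x = pvRsum (fun i => pvRsum (fun j => pvCell a (y0 + i) j) x) (y1 - y0) := by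
  obtain ⟨d, rfl⟩ : ∃ d, y1 = y0 + d := ⟨y1 - y0, by omega⟩
  rw [show y0 + d - y0 = d from by omega, pvS, pvS, pvRsum_range_add]
  ring

theorem pvRsum_diff_x (g : Nat → Int) {x0 x1 : Nat} (h : x0 ≤ x1) :
    pvRsum g x1 - pvRsum g x0 = pvRsum (fun j => g (x0 + j)) (x1 - x0) := by
  obtain ⟨d, rfl⟩ : ∃ d, x1 = x0 + d := ⟨x1 - x0, by omega⟩
  rw [show x0 + d - x0 = d from by omega, pvRsum_range_add]
  ring

-- inclusion-exclusion for the summed-area table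
theorem pvBlk_incl_excl (a : List (List Int)) {y0 y1 x0 x1 : Nat}
    (hy : y0 ≤ y1) (hx : x0 ≤ x1) :
    pvS a y1 x1 - pvS a y0 x1 - pvS a y1 x0 + pvS a y0 x0 = pvBlk a y0 y1 x0 x1 := by
  have h1 : pvS a y1 x1 - pvS a y0 x1 - (pvS a y1 x0 - pvS a y0 x0)
      = pvRsum (fun i => pvRsum (fun j => pvCell a (y0 + i) j) x1
          - pvRsum (fun j => pvCell a (y0 + i) j) x0) (y1 - y0) := by
    rw [pvS_diff_y a x1 hy, pvS_diff_y a x0 hy, ← pvRsum_sub]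
  have h2 : ∀ i, pvRsum (fun j => pvCell a (y0 + i) j) x1
      - pvRsum (fun j => pvCell a (y0 + i) j) x0
      = pvRsum (fun j => pvCell a (y0 + i) (x0 + j)) (x1 - x0) := fun i =>
    pvRsum_diff_x (fun j => pvCell a (y0 + i) j) hx
  calc pvS a y1 x1 - pvS a y0 x1 - pvS a y1 x0 + pvS a y0 x0
      = pvS a y1 x1 - pvS a y0 x1 - (pvS a y1 x0 - pvS a y0 x0) := by ring
    _ = pvBlk a y0 y1 x0 x1 := by
        rw [h1, pvBlk]
        exact pvRsum_congr _ (fun i _ => h2 i)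

-- ---- A side: the neighbour scan sums the clipped block minus the centre ----

-- any pyRange sum as a pvRsum
theorem pySumRange (v : Int → Int) (p q : Nat) :
    ((PySem.List.pyRange (p : Int) (q : Int) 1).map v).sum
      = pvRsum (fun k => v ((p + k : Nat) : Int)) (q - p) := by
  rw [PySem.List.pyRange_one, List.map_map,
      show (((q : Int)) - ((p : Int))).toNat = q - p from by omega]
  refine congrArg List.sum (List.map_congr_left fun k hk => ?_)
  show v ((p : Int) + (k : Int)) = v (((p + k : Nat) : Int))
  norm_num

-- summing a range with one interior point removed
theorem pySumRange_erase (v : Int → Int) (p q m : Nat) (hp : p ≤ m) (hq : m < q) :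
    (((PySem.List.pyRange (p : Int) (q : Int) 1).filter
        (fun t => decide (t ≠ (m : Int)))).map v).sum
      = ((PySem.List.pyRange (p : Int) (q : Int) 1).map v).sum - v (m : Int) := by
  rw [PySem.List.pyRange_one_append (p : Int) (m : Int) (q : Int) (by omega) (by omega),
      PySem.List.pyRange_one_cons (show (m : Int) < (q : Int) from by omega)]
  rw [List.filter_append, List.filter_cons]
  have hm : (decide ((m : Int) ≠ (m : Int))) = false := by simp
  rw [hm]
  rw [List.filter_eq_self.mpr (fun t ht => decide_eq_true
        (show t ≠ (m : Int) from by have := PySem.List.mem_pyRange_one.mp ht; omega)),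
      List.filter_eq_self.mpr (fun t ht => decide_eq_true
        (show t ≠ (m : Int) from by have := PySem.List.mem_pyRange_one.mp ht; omega))]
  simp only [Bool.false_eq_true, if_false, List.map_append, List.sum_append, List.map_cons,
    List.sum_cons]
  ring

theorem pvNeighSum (a : List (List Int)) (x y : Nat) (hx : x < pvW a) (hy : y < a.length) :
    (get_neighbours a ↑x ↑y).sum
      = pvBlk a (y - 1) (min a.length (y + 2)) (x - 1) (min (pvW a) (x + 2)) - pvCell a y x := by
  unfold get_neighbours
  dsimp only
  rw [PySem.List.pyGetD_zero,
      show ((a.getD 0 []).length : Int) = ((pvW a : Nat) : Int) from rfl]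
  rw [show max 0 ((x : Int) - 1) = ((x - 1 : Nat) : Int) from by omega,
      show min ((pvW a : Nat) : Int) ((x : Int) + 2) = ((min (pvW a) (x + 2) : Nat) : Int) from by omega,
      show max 0 ((y : Int) - 1) = ((y - 1 : Nat) : Int) from by omega,
      show min ((a.length : Nat) : Int) ((y : Int) + 2) = ((min a.length (y + 2) : Nat) : Int) from by omega]
  -- the double loop collects, per column x', the filtered rows
  rw [PySem.List.foldl_congr_mem _ _
        (fun (acc : List Int) (x' : Int) =>
          acc ++ ((PySem.List.pyRange ((y - 1 : Nat) : Int) ((min a.length (y + 2) : Nat) : Int) 1).filter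
              (fun y' => decide (x' ≠ (x : Int) ∨ y' ≠ (y : Int)))).map (fun y' => pvGet a y' x')) []
        (fun acc x' _ =>
          PySem.List.foldl_append_ite (fun y' => x' ≠ (x : Int) ∨ y' ≠ (y : Int))
            (fun y' => pvGet a y' x') _ acc),
      PySem.List.foldl_append_eq_flatMap, List.nil_append, List.flatMap_def, List.sum_flatten,
      List.map_map]
  -- column sum over the full clipped row range
  have hsplitx : PySem.List.pyRange ((x - 1 : Nat) : Int) ((min (pvW a) (x + 2) : Nat) : Int) 1
      = PySem.List.pyRange ((x - 1 : Nat) : Int) ((x : Nat) : Int) 1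
        ++ ((x : Nat) : Int) :: PySem.List.pyRange (((x : Nat) : Int) + 1) ((min (pvW a) (x + 2) : Nat) : Int) 1 := by
    rw [PySem.List.pyRange_one_append ((x - 1 : Nat) : Int) ((x : Nat) : Int)
          ((min (pvW a) (x + 2) : Nat) : Int) (by omega) (by omega),
        PySem.List.pyRange_one_cons (show ((x : Nat) : Int) < ((min (pvW a) (x + 2) : Nat) : Int) from by omega)]
  have hside : ∀ x' : Int, x' ≠ (x : Int) →
      ((((PySem.List.pyRange ((y - 1 : Nat) : Int) ((min a.length (y + 2) : Nat) : Int) 1).filter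
          (fun y' => decide (x' ≠ (x : Int) ∨ y' ≠ (y : Int)))).map (fun y' => pvGet a y' x')).sum)
      = ((PySem.List.pyRange ((y - 1 : Nat) : Int) ((min a.length (y + 2) : Nat) : Int) 1).map
          (fun y' => pvGet a y' x')).sum := by
    intro x' hne
    rw [List.filter_eq_self.mpr (fun y' _ => decide_eq_true (Or.inl hne))]
  have hmid :
      ((((PySem.List.pyRange ((y - 1 : Nat) : Int) ((min a.length (y + 2) : Nat) : Int) 1).filter
          (fun y' => decide (((x : Nat) : Int) ≠ (x : Int) ∨ y' ≠ (y : Int)))).map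
            (fun y' => pvGet a y' ((x : Nat) : Int))).sum)
      = ((PySem.List.pyRange ((y - 1 : Nat) : Int) ((min a.length (y + 2) : Nat) : Int) 1).map
          (fun y' => pvGet a y' ((x : Nat) : Int))).sum - pvGet a ((y : Nat) : Int) ((x : Nat) : Int) := by
    rw [List.filter_congr (fun y' _ => by
          show (decide (((x : Nat) : Int) ≠ (x : Int) ∨ y' ≠ (y : Int))) = (decide (y' ≠ ((y : Nat) : Int)))
          simp)]
    exact pySumRange_erase (fun y' => pvGet a y' ((x : Nat) : Int)) (y - 1) (min a.length (y + 2)) y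
      (by omega) (by omega)
  simp only [Function.comp_def]
  rw [hsplitx, List.map_append, List.sum_append, List.map_cons, List.sum_cons]
  rw [List.map_congr_left (fun x' hx' => hside x'
        (show x' ≠ (x : Int) from by have := PySem.List.mem_pyRange_one.mp hx'; omega)),
      List.map_congr_left (fun x' hx' => hside x'
        (show x' ≠ (x : Int) from by have := PySem.List.mem_pyRange_one.mp hx'; omega))]
  rw [hmid]
  -- reassemble: the three pieces are the full column sums over the split x-range
  have htot : (((PySem.List.pyRange ((x - 1 : Nat) : Int) ((min (pvW a) (x + 2) : Nat) : Int) 1).map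
        (fun x' => ((PySem.List.pyRange ((y - 1 : Nat) : Int) ((min a.length (y + 2) : Nat) : Int) 1).map
          (fun y' => pvGet a y' x')).sum)).sum)
      = pvBlk a (y - 1) (min a.length (y + 2)) (x - 1) (min (pvW a) (x + 2)) := by
    rw [pySumRange]
    have hcol : ∀ k, ((PySem.List.pyRange ((y - 1 : Nat) : Int) ((min a.length (y + 2) : Nat) : Int) 1).map
        (fun y' => pvGet a y' (((x - 1) + k : Nat) : Int))).sum
        = pvRsum (fun j => pvCell a ((y - 1) + j) ((x - 1) + k)) (min a.length (y + 2) - (y - 1)) := by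
      intro k
      rw [pySumRange]
      exact pvRsum_congr _ (fun j _ => pvGet_natCast a ((y - 1) + j) ((x - 1) + k))
    rw [pvRsum_congr _ (fun k _ => hcol k)]
    exact pvRsum_swap (fun k j => pvCell a ((y - 1) + j) ((x - 1) + k)) _ _
  rw [hsplitx, List.map_append, List.sum_append, List.map_cons, List.sum_cons] at htot
  rw [pvGet_natCast] 
  omega

-- a counting loop as a 0/1 sum
theorem pvFoldCount (p : Nat → Prop) [DecidablePred p] (l : List Nat) (c : Int) :
    l.foldl (fun c y => if p y then c + 1 else c) c
      = c + (l.map (fun y => if p y then (1 : Int) else 0)).sum := by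
  rw [PySem.List.foldl_ite_add_one, ← PySem.List.sum_map_ite_one_zero (fun y => decide (p y)) l]
  simp

theorem pvCountA (a : List (List Int)) :
    count_free_rolls a = pvRsum (fun x => pvRsum (fun y => pvInd a y x) a.length) (pvW a) := by
  unfold count_free_rolls
  rw [PySem.List.pyGetD_zero,
      show ((a.getD 0 []).length : Int) = ((pvW a : Nat) : Int) from rfl,
      PySem.List.pyRange_zero_natCast (pvW a), List.foldl_map,
      PySem.List.foldl_congr_mem (List.range (pvW a)) _
        (fun (c : Int) (xx : Nat) => c + pvRsum (fun yy => pvInd a yy xx) a.length) 0 ?hbody,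
      PySem.List.foldl_add]
  · simp [pvRsum]
  case hbody =>
    intro c xx hxx
    have hxw : xx < pvW a := List.mem_range.mp hxx
    rw [PySem.List.pyRange_zero_natCast a.length, List.foldl_map,
        PySem.List.foldl_congr_mem (List.range a.length) _
          (fun (c2 : Int) (yy : Nat) =>
            if pvCell a yy xx = 1 ∧
                pvBlk a (yy - 1) (min a.length (yy + 2)) (xx - 1) (min (pvW a) (xx + 2)) - 1 < 4
            then c2 + 1 else c2) c ?hin,
        pvFoldCount]
    · rfl
    case hin =>
      intro c2 yy hyy
      have hyl : yy < a.length := List.mem_range.mp hyy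
      rw [pvGet_natCast, pvNeighSum a xx yy hxw hyl]
      by_cases hc : pvCell a yy xx = 1 <;> simp [hc]

-- ---- B side: the table built by the port is the prefix-sum table ----

theorem pvFoldlLastScanl (f : List Int → List Int → List Int) (l : List (List Int)) :
    ∀ (P : List (List Int)) (b : List Int),
      l.foldl (fun P row => P ++ [f (PySem.List.pyGetD P (-1) []) row]) (P ++ [b])
        = P ++ List.scanl f b l := by
  induction l with
  | nil => intro P b; simp [List.scanl]
  | cons r rs ih =>
      intro P b
      rw [List.foldl_cons, PySem.List.pyGetD_neg_one_append_singleton]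
      rw [ih (P ++ [b]) (f b r), List.scanl_cons]
      simp

theorem pvScanlGetD (f : List Int → List Int → List Int) (l : List (List Int)) :
    ∀ (b : List Int) (n : Nat), n ≤ l.length →
      (List.scanl f b l).getD n [] = (l.take n).foldl f b := by
  induction l with
  | nil =>
      intro b n hn
      have : n = 0 := by simpa using hn
      subst this; simp [List.scanl]
  | cons r rs ih =>
      intro b n hn
      cases n with
      | zero => simp [List.scanl_cons]
      | succ n =>
          rw [List.scanl_cons]
          simp only [List.getD_cons_succ, List.take_succ_cons, List.foldl_cons]
          exact ih (f b r) n (by simpa using hn)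

theorem pvPrefixRow_eq (prev row : List Int) (w : Nat) :
    pvPrefixRow prev row w
      = 0 :: (List.range w).map
          (fun k => pvRsum (fun j => row.getD j 0) (k + 1) + prev.getD (k + 1) 0) := by
  have aux : ∀ n : Nat,
      (PySem.List.pyRange 0 (n : Int) 1).foldl
        (fun (st : List Int × Int) x =>
          let running := st.2 + PySem.List.pyGetD row x 0
          (st.1 ++ [running + PySem.List.pyGetD prev (x + 1) 0], running))
        ([0], 0)
      = (0 :: (List.range n).map
            (fun k => pvRsum (fun j => row.getD j 0) (k + 1) + prev.getD (k + 1) 0),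
         pvRsum (fun j => row.getD j 0) n) := by
    intro n
    induction n with
    | zero =>
        rw [show ((0 : Nat) : Int) = 0 from rfl, PySem.List.pyRange_one_eq_nil le_rfl]
        simp [pvRsum]
    | succ n ih =>
        rw [show ((n + 1 : Nat) : Int) = (n : Int) + 1 from by push_cast; ring,
            PySem.List.pyRange_one_succ_right (Int.natCast_nonneg n), List.foldl_append, ih]
        rw [List.foldl_cons, List.foldl_nil]
        dsimp only
        rw [PySem.List.pyGetD_natCast row n 0,
            show ((n : Int) + 1) = ((n + 1 : Nat) : Int) from by push_cast; ring,
            PySem.List.pyGetD_natCast prev (n + 1) 0,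
            List.range_succ, List.map_append, pvRsum_succ]
        simp
        exact (pvRsum_succ _ n).symm
  unfold pvPrefixRow
  rw [aux w]

theorem pvTakeFoldEntry (a : List (List Int)) :
    ∀ (y : Nat), y ≤ a.length → ∀ x ≤ pvW a,
      (((a.take y).foldl (fun prev row => pvPrefixRow prev row (pvW a))
          (List.replicate (pvW a + 1) 0)).getD x 0) = pvS a y x := by
  intro y
  induction y with
  | zero =>
      intro _ x hx
      have hlt : x < pvW a + 1 := Nat.lt_succ_of_le hx
      simp only [List.take_zero, List.foldl_nil]
      rw [List.getD_eq_getElem?_getD, List.getElem?_replicate, if_pos hlt]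
      simp [pvS, pvRsum]
  | succ y ih =>
      intro hy x hx
      have hyl : y < a.length := by omega
      rw [List.take_add_one, List.getElem?_eq_getElem hyl]
      simp only [Option.toList_some, List.foldl_append, List.foldl_cons, List.foldl_nil]
      rw [pvPrefixRow_eq]
      cases x with
      | zero =>
          show (0 : Int) = pvS a (y + 1) 0
          exact (pvRsum_const_zero (y + 1)).symm
      | succ k =>
          have hkw : k < pvW a := by omega
          rw [List.getD_cons_succ, PySem.List.getD_map_range _ _ _ _ hkw,
              ih (by omega) (k + 1) hx]
          have hrow : ∀ j, (a[y].getD j 0) = pvCell a y j := by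
            intro j
            rw [pvCell, List.getD_eq_getElem a [] hyl]
          rw [pvRsum_congr (k + 1) (fun j _ => hrow j),
              show pvS a (y + 1) (k + 1)
                  = pvS a y (k + 1) + pvRsum (fun j => pvCell a y j) (k + 1) from
                pvRsum_succ _ y]
          ring

theorem pvTblEntry (a : List (List Int)) (n m : Nat) (hn : n ≤ a.length) (hm : m ≤ pvW a) :
    ((List.scanl (fun prev row => pvPrefixRow prev row (pvW a))
        (List.replicate (pvW a + 1) 0) a).getD n []).getD m 0 = pvS a n m := by
  rw [pvScanlGetD (fun prev row => pvPrefixRow prev row (pvW a)) a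
        (List.replicate (pvW a + 1) 0) n hn]
  exact pvTakeFoldEntry a n hn m hm

theorem pvCountB (a : List (List Int)) :
    count_free_rolls_alt a = pvRsum (fun y => pvRsum (fun x => pvInd a y x) (pvW a)) a.length := by
  unfold count_free_rolls_alt
  dsimp only
  rw [PySem.List.pyGetD_zero,
      show ((a.getD 0 []).length : Int) = ((pvW a : Nat) : Int) from rfl,
      Int.toNat_natCast]
  rw [show a.foldl (fun P row => P ++ [pvPrefixRow (PySem.List.pyGetD P (-1) []) row (pvW a)])
        [List.replicate (pvW a + 1) 0]
      = List.scanl (fun prev row => pvPrefixRow prev row (pvW a))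
          (List.replicate (pvW a + 1) 0) a from by
    simpa using pvFoldlLastScanl (fun prev row => pvPrefixRow prev row (pvW a)) a []
      (List.replicate (pvW a + 1) 0)]
  rw [PySem.List.pyRange_zero_natCast a.length, List.foldl_map,
      PySem.List.foldl_congr_mem (List.range a.length) _
        (fun (c : Int) (yy : Nat) => c + pvRsum (fun xx => pvInd a yy xx) (pvW a)) 0 ?hbody,
      PySem.List.foldl_add]
  · simp [pvRsum]
  case hbody =>
    intro c yy hyy
    have hyl : yy < a.length := List.mem_range.mp hyy
    rw [PySem.List.pyRange_zero_natCast (pvW a), List.foldl_map,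
        PySem.List.foldl_congr_mem (List.range (pvW a)) _
          (fun (c2 : Int) (xx : Nat) =>
            if pvCell a yy xx = 1 ∧
                pvBlk a (yy - 1) (min a.length (yy + 2)) (xx - 1) (min (pvW a) (xx + 2)) - 1 < 4
            then c2 + 1 else c2) c ?hin,
        pvFoldCount]
    · rfl
    case hin =>
      intro c2 xx hxx
      have hxw : xx < pvW a := List.mem_range.mp hxx
      rw [show min ((a.length : Nat) : Int) ((yy : Int) + 2) = ((min a.length (yy + 2) : Nat) : Int) from by omega,
          show max 0 ((yy : Int) - 1) = ((yy - 1 : Nat) : Int) from by omega,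
          show min ((pvW a : Nat) : Int) ((xx : Int) + 2) = ((min (pvW a) (xx + 2) : Nat) : Int) from by omega,
          show max 0 ((xx : Int) - 1) = ((xx - 1 : Nat) : Int) from by omega]
      simp only [PySem.List.pyGetD_natCast]
      rw [pvTblEntry a _ _ (by omega) (by omega),
          pvTblEntry a _ _ (by omega) (by omega),
          pvTblEntry a _ _ (by omega) (by omega),
          pvTblEntry a _ _ (by omega) (by omega)]
      rw [pvBlk_incl_excl a (show yy - 1 ≤ min a.length (yy + 2) from by omega)
            (show xx - 1 ≤ min (pvW a) (xx + 2) from by omega)]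
      rw [show (a.getD yy []).getD xx 0 = pvCell a yy xx from rfl]
      by_cases hc : pvCell a yy xx = 1 <;> simp [hc]

-- ===== VERDICT (by name: the statement is the Claim_ definition above) =====
theorem count_free_rolls_spec : Claim_equal_count_free_rolls := by
  intro a _ _
  unfold Spec_count_free_rolls
  rw [pvCountA, pvCountB]
  exact pvRsum_swap (fun x y => pvInd a y x) (pvW a) a.length
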